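-- pv_equiv track=rewrite | github.com/its-the-pie/semantic_search_party | main.py | make_bins
-- ===== SOURCE A (Python) =====
-- def make_bins(scores, num_levels):
--     sorted_words = sorted(scores)
--     bin_size = len(sorted_words) // num_levels
--     bin_dict = {}
--     for i in range(num_levels):
--         if i == num_levels - 1:
--             words_in_bin = sorted_words[i * bin_size:]
--         else:
--             words_in_bin = sorted_words[i * bin_size : (i + 1) * bin_size]
--
--         word_list = []
--         for w in words_in_bin:
--             word_list.append(w[1])
--         bin_dict[i + 1] = word_list
--     return bin_dict
-- ===== SOURCE B (Python) =====
-- def make_bins(scores, num_levels):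
--     sorted_words = sorted(scores)
--     bin_size = len(sorted_words) // num_levels
--     bin_dict = {i + 1: [] for i in range(num_levels)}
--     for j, (_, word) in enumerate(sorted_words):
--         bin_nr = num_levels if bin_size == 0 else min(j // bin_size + 1, num_levels)
--         bin_dict[bin_nr].append(word)
--     return bin_dict
-- ===== Notes on version B (the rewrite author's own statement) =====
-- stated objective: faster
-- what changed: A slices the sorted list once per bin with a nested copy loop; B pre-initializes the bin dict and makes one flat pass over enumerate(sorted_words), computing each word's bin index arithmetically (min(j // bin_size, num_levels-1) + 1, everything to the last bin when bin_size == 0), avoiding the intermediate per-bin slice lists.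
-- outside the precondition, e.g. on make_bins([(1, 'a')], -1): A returns {}, B raises KeyError
import Mathlib
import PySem

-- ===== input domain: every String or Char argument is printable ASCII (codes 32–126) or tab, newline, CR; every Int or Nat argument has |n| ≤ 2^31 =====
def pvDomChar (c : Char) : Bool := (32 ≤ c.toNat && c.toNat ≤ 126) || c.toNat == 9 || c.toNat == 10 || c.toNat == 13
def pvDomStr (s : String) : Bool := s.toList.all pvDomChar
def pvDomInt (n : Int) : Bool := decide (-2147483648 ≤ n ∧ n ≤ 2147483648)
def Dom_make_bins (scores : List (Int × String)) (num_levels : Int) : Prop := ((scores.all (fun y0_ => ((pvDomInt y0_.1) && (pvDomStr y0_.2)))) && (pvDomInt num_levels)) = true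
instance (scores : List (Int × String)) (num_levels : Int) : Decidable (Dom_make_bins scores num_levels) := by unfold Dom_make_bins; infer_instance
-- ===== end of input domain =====

-- B replaces A's per-bin slicing (a nested copy loop per bin) with a pre-initialized bin dict and
-- one flat pass over enumerate(sorted_words) computing each word's bin index arithmetically.

-- ===== PORT A =====
def make_bins (scores : List (Int × String)) (num_levels : Int) : List (Int × List String) :=
  let sorted_words := PySem.List.sorted2 scores (·.1) (·.2)
  let bin_size := PySem.Int.floordiv (PySem.List.len sorted_words) num_levels
  ((PySem.List.pyRange 0 num_levels 1).foldl (fun bin_dict i =>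
    let words_in_bin :=
      if i == num_levels - 1 then
        PySem.List.slice sorted_words (some (i * bin_size)) none
      else
        PySem.List.slice sorted_words (some (i * bin_size)) (some ((i + 1) * bin_size))
    let word_list := words_in_bin.foldl (fun wl w => wl ++ [w.2]) []
    bin_dict.insert (i + 1) word_list) (PySem.Dict.empty : PySem.Dict Int (List String))).items

-- ===== PORT B =====
def make_bins_alt (scores : List (Int × String)) (num_levels : Int) : List (Int × List String) :=
  let sorted_words := PySem.List.sorted2 scores (·.1) (·.2)
  let bin_size := PySem.Int.floordiv (PySem.List.len sorted_words) num_levels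
  let bin_dict : PySem.Dict Int (List String) :=
    (PySem.List.pyRange 0 num_levels 1).foldl (fun d i => d.insert (i + 1) []) PySem.Dict.empty
  ((PySem.List.enumerate sorted_words).foldl (fun d jw =>
    let bin_nr := if bin_size == 0 then num_levels
                  else min (PySem.Int.floordiv jw.1 bin_size + 1) num_levels
    d.modify bin_nr [] (fun l => l ++ [jw.2.2])) bin_dict).items

-- ===== PRECONDITION & SPEC =====
-- Pre_ excludes num_levels <= 0: at num_levels == 0 A raises ZeroDivisionError, and for negative
-- num_levels A returns an empty dict that silently drops every word (an artefact of range() over a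
-- negative count), where B's single assignment pass raises KeyError.
def Pre_make_bins (scores : List (Int × String)) (num_levels : Int) : Prop := 1 ≤ num_levels
instance (scores : List (Int × String)) (num_levels : Int) : Decidable (Pre_make_bins scores num_levels) := by unfold Pre_make_bins; infer_instance
def pvWitness_make_bins : (List (Int × String)) × Int := ([(1, "a"), (0, "b"), (2, "c")], 2)

def Spec_make_bins (scores : List (Int × String)) (num_levels : Int) (out : List (Int × List String)) : Prop := out = make_bins_alt scores num_levels
instance (scores : List (Int × String)) (num_levels : Int) (out : List (Int × List String)) : Decidable (Spec_make_bins scores num_levels out) := by unfold Spec_make_bins; infer_instance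

-- ===== CLAIM (what is proved, stated in full; the proofs are below) =====
def Claim_equal_make_bins : Prop := ∀ (scores : List (Int × String)) (num_levels : Int), Dom_make_bins scores num_levels → Pre_make_bins scores num_levels → Spec_make_bins scores num_levels (make_bins scores num_levels)

-- ===== LEMMAS AND PROOFS =====

-- elements of (enumerate ws t) whose index is ≥ a, in order
theorem pv_enum_filter_from {α : Type} (ws : List α) (t a : Int) :
    ((PySem.List.enumerate ws t).filter (fun jw => decide (a ≤ jw.1))).map (·.2)
      = ws.drop (a - t).toNat := by
  induction ws generalizing t with
  | nil => simp [PySem.List.enumerate_nil]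
  | cons x xs ih =>
    rw [PySem.List.enumerate_cons, List.filter_cons]
    by_cases ha : a ≤ t
    · have h2 : (a - t).toNat = 0 := by omega
      have h3 : (a - (t+1)).toNat = 0 := by omega
      simp [ha, ih (t+1), h2, h3]
    · have h2 : (a - t).toNat = (a - (t+1)).toNat + 1 := by omega
      simp [ha, ih (t+1), h2]

-- elements of (enumerate ws t) whose index lies in [a, b), in order
theorem pv_enum_filter_interval {α : Type} (ws : List α) (t a b : Int) :
    ((PySem.List.enumerate ws t).filter (fun jw => decide (a ≤ jw.1) && decide (jw.1 < b))).map (·.2)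
      = (ws.take (b - t).toNat).drop (a - t).toNat := by
  induction ws generalizing t with
  | nil => simp [PySem.List.enumerate_nil]
  | cons x xs ih =>
    rw [PySem.List.enumerate_cons, List.filter_cons]
    by_cases hb : t < b
    · by_cases ha : a ≤ t
      · have h1 : (b - t).toNat = (b - (t+1)).toNat + 1 := by omega
        have h2 : (a - t).toNat = 0 := by omega
        have h3 : (a - (t+1)).toNat = 0 := by omega
        simp [ha, hb, ih (t+1), h1, h2, h3]
      · have h1 : (b - t).toNat = (b - (t+1)).toNat + 1 := by omega
        have h2 : (a - t).toNat = (a - (t+1)).toNat + 1 := by omega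
        simp [ha, ih (t+1), h1, h2]
    · have h1 : (b - t).toNat = 0 := by omega
      have h2 : (b - (t+1)).toNat = 0 := by omega
      simp [hb, ih (t+1), h1, h2]

-- the core per-bin fact: B's arithmetically selected words are exactly A's slice of the sorted list
theorem pv_bin_eq (ws : List (Int × String)) (L s i : Int) (hL : 1 ≤ L) (hs : 0 ≤ s)
    (hi0 : 0 ≤ i) (hiL : i < L) :
    ((PySem.List.enumerate ws).filter (fun jw =>
        (if s == 0 then L else min (PySem.Int.floordiv jw.1 s + 1) L) == i + 1)).map (fun jw => jw.2.2)
      = ((if i == L - 1 then PySem.List.slice ws (some (i * s)) none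
          else PySem.List.slice ws (some (i * s)) (some ((i + 1) * s))).map (·.2)) := by
  have hmm : ∀ (l : List (Int × (Int × String))) (p : Int × (Int × String) → Bool),
      (l.filter p).map (fun jw => jw.2.2) = ((l.filter p).map (·.2)).map (·.2) := by
    intro l p; simp [List.map_map]
  rcases eq_or_lt_of_le hs with hs0 | hs'
  · -- bin_size = 0: everything lands in the last bin, the others are empty
    rcases hs0
    by_cases hi : i = L - 1
    · rcases hi
      simp only [beq_self_eq_true, if_true]
      rw [List.filter_congr (q := fun _ => true) (by intro jw hjw; simp only [beq_iff_eq]; omega)]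
      rw [hmm, List.filter_true, mul_zero, PySem.List.slice_from ws (le_refl 0)]
      rw [PySem.List.map_snd_enumerate]
      simp
    · rw [if_neg (by simp only [beq_iff_eq]; omega)]
      rw [List.filter_congr (q := fun _ => false) (by intro jw hjw; simp only [beq_self_eq_true, if_true]; simp; omega)]
      rw [List.filter_false, mul_zero, mul_zero, PySem.List.slice_toNat ws (le_refl 0) (le_refl 0)]
      simp
  · -- bin_size > 0
    have hsne : (s == 0) = false := beq_false_of_ne (by omega)
    have hnn : (0:Int) ≤ (L - 1) * s := mul_nonneg (by omega) hs
    by_cases hi : i = L - 1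
    · have hfc : ∀ jw ∈ PySem.List.enumerate ws 0,
          ((if s == 0 then L else min (PySem.Int.floordiv jw.1 s + 1) L) == i + 1)
            = decide ((L - 1) * s ≤ jw.1) := by
        intro jw hjw
        have hbr := PySem.Int.le_floordiv_iff_mul_le (a := jw.1) (b := s) (q := L - 1) hs'
        rw [if_neg (by simp [hsne]), Bool.eq_iff_iff]
        simp only [beq_iff_eq, decide_eq_true_eq]
        rw [← hbr]; omega
      rw [List.filter_congr hfc, hmm, pv_enum_filter_from]
      rw [if_pos (by simp [hi]), hi]
      rw [PySem.List.slice_from ws hnn]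
      simp
    · have hfc : ∀ jw ∈ PySem.List.enumerate ws 0,
          ((if s == 0 then L else min (PySem.Int.floordiv jw.1 s + 1) L) == i + 1)
            = (decide (i * s ≤ jw.1) && decide (jw.1 < (i + 1) * s)) := by
        intro jw hjw
        have hbr := PySem.Int.floordiv_eq_iff_of_pos (a := jw.1) (b := s) (q := i) hs'
        rw [if_neg (by simp [hsne]), Bool.eq_iff_iff]
        simp only [beq_iff_eq, decide_eq_true_eq, Bool.and_eq_true]
        rw [← hbr]; omega
      rw [List.filter_congr hfc, hmm, pv_enum_filter_interval]
      rw [if_neg (by simp [hi])]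
      rw [PySem.List.slice_toNat ws (mul_nonneg hi0 hs) (mul_nonneg (by omega) hs)]
      rw [List.drop_take]
      simp

-- the two dict-building folds produce the same items list
theorem pv_folds_eq (ws : List (Int × String)) (L s : Int) (hL : 1 ≤ L) (hs : 0 ≤ s) :
    ((PySem.List.pyRange 0 L 1).foldl (fun bin_dict i =>
        bin_dict.insert (i + 1) ((if i == L - 1 then PySem.List.slice ws (some (i * s)) none
          else PySem.List.slice ws (some (i * s)) (some ((i + 1) * s))).foldl (fun wl w => wl ++ [w.2]) []))
      (PySem.Dict.empty : PySem.Dict Int (List String))).items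
    = ((PySem.List.enumerate ws).foldl (fun d jw =>
        d.modify (if s == 0 then L else min (PySem.Int.floordiv jw.1 s + 1) L) [] (fun l => l ++ [jw.2.2]))
        ((PySem.List.pyRange 0 L 1).foldl (fun d i => d.insert (i + 1) ([] : List String)) PySem.Dict.empty)).items := by
  have hinj : Function.Injective (fun i : Int => i + 1) := fun a b h => by simpa using h
  have hnd : ((PySem.List.pyRange 0 L 1).map (fun i => i + 1)).Nodup :=
    (PySem.List.nodup_pyRange_one 0 L).map hinj
  have hfresh : ∀ a ∈ PySem.List.pyRange 0 L 1,
      (PySem.Dict.empty : PySem.Dict Int (List String)).contains (a + 1) = false := by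
    intro a _; simp [PySem.Dict.contains_empty]
  -- A's dict as an explicit items list
  have hA : ((PySem.List.pyRange 0 L 1).foldl (fun bin_dict i =>
        bin_dict.insert (i + 1) ((if i == L - 1 then PySem.List.slice ws (some (i * s)) none
          else PySem.List.slice ws (some (i * s)) (some ((i + 1) * s))).foldl (fun wl w => wl ++ [w.2]) []))
      (PySem.Dict.empty : PySem.Dict Int (List String))).items
      = (PySem.List.pyRange 0 L 1).map (fun i => (i + 1,
          (if i == L - 1 then PySem.List.slice ws (some (i * s)) none
           else PySem.List.slice ws (some (i * s)) (some ((i + 1) * s))).map (fun w => w.2))) := by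
    simp only [PySem.List.foldl_append_singleton_eq_map, List.nil_append]
    rw [PySem.Dict.items_foldl_insert_fresh _ (fun i => i + 1) _ _ hfresh hnd]
    rfl
  -- B's initial dict as an explicit items list
  have hB0 : (((PySem.List.pyRange 0 L 1).foldl (fun d i => d.insert (i + 1) ([] : List String))
        PySem.Dict.empty)).items
      = (PySem.List.pyRange 0 L 1).map (fun i => (i + 1, ([] : List String))) := by
    rw [PySem.Dict.items_foldl_insert_fresh _ (fun i => i + 1) _ _ hfresh hnd]
    rfl
  set d0 := (PySem.List.pyRange 0 L 1).foldl (fun d i => d.insert (i + 1) ([] : List String))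
      PySem.Dict.empty with hd0
  have hkeys0 : d0.keys = (PySem.List.pyRange 0 L 1).map (fun i => i + 1) := by
    simp only [PySem.Dict.keys, hB0, List.map_map]; rfl
  have hnd0 : d0.keys.Nodup := by rw [hkeys0]; exact hnd
  set binf : Int × (Int × String) → Int :=
    (fun jw => if s == 0 then L else min (PySem.Int.floordiv jw.1 s + 1) L) with hbinf
  -- every computed bin index is a pre-initialized key
  have hbmem : ∀ jw ∈ PySem.List.enumerate ws, binf jw ∈ d0.keys := by
    intro jw hjw
    rcases (PySem.List.mem_enumerate_iff ws 0 jw).1 hjw with ⟨k, hk, rfl⟩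
    rw [hkeys0]
    have h1L : 1 ≤ binf (0 + (k:Int), ws[k]) ∧ binf (0 + (k:Int), ws[k]) ≤ L := by
      rw [hbinf]
      by_cases hsz : s = 0
      · simp [hsz]; omega
      · have hs' : 0 < s := by omega
        have hfd : 0 ≤ PySem.Int.floordiv (0 + (k:Int)) s := by
          rw [PySem.Int.floordiv_eq_ediv_of_pos hs']
          exact Int.ediv_nonneg (by simp) (by omega)
        simp only [beq_false_of_ne hsz]
        constructor <;> omega
    refine List.mem_map.2 ⟨binf (0 + (k:Int), ws[k]) - 1, PySem.List.mem_pyRange_one.2 (by omega), by omega⟩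
  set F := (PySem.List.enumerate ws).foldl (fun d jw =>
      d.modify (binf jw) [] (fun l => l ++ [jw.2.2])) d0 with hF
  have hkeysF : F.keys = d0.keys := by
    rw [hF, PySem.Dict.keys_foldl_modify_key _ binf [] (fun _ jw => fun l => l ++ [jw.2.2])]
    rw [PySem.Set.update_eq_append_filter]
    have : ((PySem.Set.ofList ((PySem.List.enumerate ws).map binf)).filter
        (fun y => !PySem.Set.contains d0.keys y)) = [] := by
      rw [List.filter_eq_nil_iff]
      intro y hy
      have hmem : y ∈ (PySem.List.enumerate ws).map binf := (PySem.Set.mem_ofList _ _).1 hy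
      rcases List.mem_map.1 hmem with ⟨jw, hjw, rfl⟩
      simpa using hbmem jw hjw
    rw [this, List.append_nil]
  have hndF : F.keys.Nodup := by
    rw [hF]; exact PySem.Dict.nodup_keys_foldl_modify_key _ binf [] _ d0 hnd0
  have hgetD : ∀ c : Int, F.getD c [] = d0.getD c []
      ++ (((PySem.List.enumerate ws).filter (fun jw => binf jw == c)).map (fun jw => jw.2.2)) := by
    intro c
    have hFeq : F = ((PySem.List.enumerate ws).map (fun jw => (binf jw, jw.2.2))).foldl
        (fun d p => d.modify p.1 [] (fun x => x ++ [p.2])) d0 := by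
      rw [List.foldl_map]
    rw [hFeq, PySem.Dict.getD_foldl_modify_append]
    simp [List.filter_map, List.map_map, Function.comp_def]
  have hgetD0 : ∀ i ∈ PySem.List.pyRange 0 L 1, d0.getD (i + 1) [] = [] := by
    intro i hi
    exact PySem.Dict.getD_of_mem_items d0 (by rw [hB0] at *; exact List.mem_map.2 ⟨i, hi, rfl⟩) hnd0 []
  rw [hA, PySem.Dict.items_eq_map_keys F hndF [], hkeysF, hkeys0, List.map_map]
  apply List.map_congr_left
  intro i hi
  rcases PySem.List.mem_pyRange_one.1 hi with ⟨hi0, hiL⟩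
  have := pv_bin_eq ws L s i hL hs hi0 hiL
  simp only [Function.comp_apply, hgetD (i + 1), hgetD0 i hi, List.nil_append, hbinf]
  exact congrArg (fun z => (i + 1, z)) this.symm

theorem make_bins_spec' : ∀ (scores : List (Int × String)) (num_levels : Int),
    1 ≤ num_levels → make_bins scores num_levels = make_bins_alt scores num_levels := by
  intro scores L hL
  have hs : 0 ≤ PySem.Int.floordiv
      (PySem.List.len (PySem.List.sorted2 scores (·.1) (·.2))) L := by
    rw [PySem.Int.floordiv_eq_ediv_of_pos (by omega)]
    exact Int.ediv_nonneg (by simp [PySem.List.len]) (by omega)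
  exact pv_folds_eq (PySem.List.sorted2 scores (·.1) (·.2)) L _ hL hs

-- ===== VERDICT (by name: the statement is the Claim_ definition above) =====
theorem make_bins_spec : Claim_equal_make_bins := by
  intro scores num_levels _ hpre
  unfold Spec_make_bins
  exact make_bins_spec' scores num_levels hpre
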